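-- pv_equiv track=rewrite | github.com/matheusaraujocampos12345-collab/PROJETO_2 | monitor.py | extrairIp
-- ===== SOURCE A (Python) =====
-- def extrairIp(linha):
--     ip = ''
--     lendo = False
--
--     for c in linha:
--         if c == ']':
--             lendo = True
--             continue
--
--         if lendo:
--             if c != ' ':
--                 ip += c
--             else:
--                 break
--
--     return ip
-- ===== SOURCE B (Python) =====
-- def extrairIp(linha):
--     resto = linha.partition(']')[2]
--     return resto.partition(' ')[0]
-- ===== Notes on version B (the rewrite author's own statement) =====
-- stated objective: idiomatic
-- what changed: Replaces the flag-driven character loop with string accumulator by two str.partition calls: take the part after the first closing bracket and cut it at the first space.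
-- intended difference: On lines with another closing bracket between the first closing bracket and the next space, A silently deletes those bracket characters from the returned token; B returns the substring verbatim, the intended text after the bracket. — e.g. on extrairIp("x]a]b c"): A returns "ab", B returns "a]b"
import Mathlib
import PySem

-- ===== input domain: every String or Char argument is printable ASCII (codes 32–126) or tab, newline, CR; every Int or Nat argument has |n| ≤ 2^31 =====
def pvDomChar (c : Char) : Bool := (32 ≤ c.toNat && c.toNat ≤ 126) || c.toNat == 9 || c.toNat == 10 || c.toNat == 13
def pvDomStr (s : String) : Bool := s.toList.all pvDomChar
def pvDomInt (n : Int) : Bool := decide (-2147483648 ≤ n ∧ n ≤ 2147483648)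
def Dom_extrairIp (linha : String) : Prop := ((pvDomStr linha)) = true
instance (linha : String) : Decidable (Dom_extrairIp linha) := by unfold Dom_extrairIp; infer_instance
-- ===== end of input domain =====

-- B replaces A's flag-driven scanning loop by two str.partition calls (idiomatic); on lines with
-- a second closing bracket before the next space A drops it, B keeps the text verbatim (see D_).

-- ===== PORT A =====
-- the for-loop with its `ip` accumulator, `lendo` flag and `break`
def aLoop : List Char → List Char → Bool → List Char
  | [], ip, _ => ip
  | c :: cs, ip, lendo =>
    if c = ']' then aLoop cs ip true
    else if lendo then
      (if c ≠ ' ' then aLoop cs (ip ++ [c]) lendo else ip)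
    else aLoop cs ip lendo

def extrairIp (linha : String) : String := String.ofList (aLoop linha.toList [] false)

-- ===== PORT B =====
-- hand port of the used components of str.partition (exact: partition splits at the FIRST
-- occurrence of the separator; [2] is what follows it — empty if absent; [0] what precedes it)
def partAfter (sep : Char) : List Char → List Char
  | [] => []
  | c :: cs => if c = sep then cs else partAfter sep cs

def partBefore (sep : Char) : List Char → List Char
  | [] => []
  | c :: cs => if c = sep then [] else c :: partBefore sep cs

def extrairIp_alt (linha : String) : String :=
  String.ofList (partBefore ' ' (partAfter ']' linha.toList))

-- ===== PRECONDITION & SPEC =====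
-- On lines with another closing bracket between the first closing bracket and the next space,
-- A silently deletes those bracket characters from the returned token; B returns the substring
-- verbatim, the intended text after the bracket.
def D_extrairIp (linha : String) : Prop :=
  ']' ∈ ((linha.toList.dropWhile (· ≠ ']')).drop 1).takeWhile (· ≠ ' ')
instance (linha : String) : Decidable (D_extrairIp linha) := by unfold D_extrairIp; infer_instance

def Spec_extrairIp (linha : String) (out : String) : Prop := ¬ D_extrairIp linha → out = extrairIp_alt linha
instance (linha : String) (out : String) : Decidable (Spec_extrairIp linha out) := by unfold Spec_extrairIp; infer_instance

def pvDiffWitness_extrairIp : String := "x]a]b c"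
def pvDiffWitnessOut_extrairIp : String × String := ("ab", "a]b")

-- ===== CLAIM (what is proved, stated in full; the proofs are below) =====
def Claim_unchanged_extrairIp : Prop := ∀ (linha : String), Dom_extrairIp linha → Spec_extrairIp linha (extrairIp linha)
def Claim_changed_extrairIp : Prop := Dom_extrairIp (pvDiffWitness_extrairIp) ∧ D_extrairIp (pvDiffWitness_extrairIp) ∧ extrairIp (pvDiffWitness_extrairIp) = pvDiffWitnessOut_extrairIp.1 ∧ extrairIp_alt (pvDiffWitness_extrairIp) = pvDiffWitnessOut_extrairIp.2 ∧ pvDiffWitnessOut_extrairIp.1 ≠ pvDiffWitnessOut_extrairIp.2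
def Claim_exact_extrairIp : Prop := ∀ (linha : String), Dom_extrairIp linha → D_extrairIp linha → extrairIp linha ≠ extrairIp_alt linha

-- ===== LEMMAS AND PROOFS =====

-- B's helpers, in terms of the library functions D_ is phrased with
theorem partAfter_eq (sep : Char) (l : List Char) :
    partAfter sep l = (l.dropWhile (· ≠ sep)).drop 1 := by
  induction l with
  | nil => rfl
  | cons c cs ih => by_cases hc : c = sep <;> simp [partAfter, List.dropWhile, hc, ih]

theorem partBefore_eq (sep : Char) (l : List Char) :
    partBefore sep l = l.takeWhile (· ≠ sep) := by
  induction l with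
  | nil => rfl
  | cons c cs ih => by_cases hc : c = sep <;> simp [partBefore, List.takeWhile, hc, ih]

-- until the first closing bracket the loop only flips `lendo`; afterwards it runs in reading mode on the rest
theorem aLoop_false (l : List Char) : ∀ ip, aLoop l ip false = aLoop (partAfter ']' l) ip true := by
  induction l with
  | nil => intro ip; rfl
  | cons c cs ih =>
    intro ip
    by_cases hc : c = ']'
    · simp [aLoop, partAfter, hc]
    · simp [aLoop, partAfter, hc, ih ip]

-- in reading mode the loop appends the non-bracket characters before the first space
theorem aLoop_true (cs : List Char) : ∀ ip,
    aLoop cs ip true = ip ++ (partBefore ' ' cs).filter (· ≠ ']') := by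
  induction cs with
  | nil => intro ip; simp [aLoop, partBefore]
  | cons c cs ih =>
    intro ip
    by_cases hc : c = ']'
    · simp [aLoop, partBefore, hc, ih ip]
    · by_cases hs : c = ' '
      · simp [aLoop, partBefore, hs]
      · simp [aLoop, partBefore, hc, hs, ih (ip ++ [c])]

-- A's result is B's token with all closing brackets filtered out
theorem extrairIp_eq_filter (linha : String) :
    extrairIp linha =
      String.ofList ((partBefore ' ' (partAfter ']' linha.toList)).filter (· ≠ ']')) := by
  simp [extrairIp, aLoop_false, aLoop_true]

-- D_ says exactly: B's token contains a closing bracket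
theorem D_iff (linha : String) :
    D_extrairIp linha ↔ ']' ∈ partBefore ' ' (partAfter ']' linha.toList) := by
  unfold D_extrairIp
  rw [partAfter_eq, partBefore_eq]

-- ===== VERDICT (by name: the statements are the Claim_ definitions above) =====
theorem extrairIp_spec : Claim_unchanged_extrairIp := by
  intro linha _ hD
  show extrairIp linha = extrairIp_alt linha
  rw [extrairIp_eq_filter, extrairIp_alt]
  rw [D_iff] at hD
  congr 1
  exact List.filter_eq_self.mpr (fun c hc => by
    simp only [decide_eq_true_eq]
    intro h; exact hD (h ▸ hc))

theorem extrairIp_changed : Claim_changed_extrairIp := by unfold Claim_changed_extrairIp; decide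

theorem extrairIp_tight : Claim_exact_extrairIp := by
  intro linha _ hD h
  rw [D_iff] at hD
  rw [extrairIp_eq_filter, extrairIp_alt] at h
  have hl : (partBefore ' ' (partAfter ']' linha.toList)).filter (· ≠ ']')
      = partBefore ' ' (partAfter ']' linha.toList) := by
    simpa using congrArg String.toList h
  rw [← hl] at hD
  simp at hD
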